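-- pv_equiv track=rewrite | github.com/sometastycake/leetcode | strings/easy/count-asterisks.py | countAsterisks
-- ===== SOURCE A (Python) =====
-- def countAsterisks(s: str) -> int:
--     result = 0
--     amount = 0
--     pair = False
--     for letter in s:
--         if letter == '|' and not pair:
--             pair = True
--             if amount:
--                 result += amount
--                 amount = 0
--         elif letter == '|' and pair:
--             pair = False
--         elif not pair and letter == '*':
--             amount += 1
--     if not pair and amount:
--         result += amount
--     return result
-- ===== SOURCE B (Python) =====
-- def countAsterisks(s: str) -> int:
--     return sum(p.count('*') for i, p in enumerate(s.split('|')) if i % 2 == 0)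
-- ===== Notes on version B (the rewrite author's own statement) =====
-- stated objective: simpler
-- what changed: Replaces A's single-pass toggle state machine (result/amount/pair flags) with a one-liner: split the string on the pipe character and sum the asterisk counts of the even-indexed segments, which are exactly the parts outside pipe pairs.
import Mathlib
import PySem

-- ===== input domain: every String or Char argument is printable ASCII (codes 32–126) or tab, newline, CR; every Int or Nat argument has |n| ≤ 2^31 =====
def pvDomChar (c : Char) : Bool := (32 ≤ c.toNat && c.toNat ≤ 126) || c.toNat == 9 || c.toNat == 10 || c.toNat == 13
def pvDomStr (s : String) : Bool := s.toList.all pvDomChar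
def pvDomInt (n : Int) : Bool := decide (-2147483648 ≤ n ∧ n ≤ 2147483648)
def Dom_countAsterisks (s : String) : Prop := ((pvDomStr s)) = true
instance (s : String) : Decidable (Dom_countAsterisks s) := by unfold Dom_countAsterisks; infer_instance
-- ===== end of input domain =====

-- B replaces A's single-pass toggle state machine with split-on-'|' and a sum of
-- '*' counts over the even-indexed segments (simpler decomposition, same cost).

-- ===== PORT A =====
-- state = (result, amount, pair)
def countAsterisks (s : String) : Int :=
  let st := s.toList.foldl
    (fun (st : Int × Int × Bool) letter =>
      if letter == '|' && !st.2.2 then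
        (if st.2.1 ≠ 0 then (st.1 + st.2.1, 0, true) else (st.1, st.2.1, true))
      else if letter == '|' && st.2.2 then
        (st.1, st.2.1, false)
      else if !st.2.2 && letter == '*' then
        (st.1, st.2.1 + 1, st.2.2)
      else st)
    (0, 0, false)
  if st.2.2 = false ∧ st.2.1 ≠ 0 then st.1 + st.2.1 else st.1

-- ===== PORT B =====
-- sum(p.count('*') for i, p in enumerate(s.split('|')) if i % 2 == 0)
def countAsterisks_alt (s : String) : Int :=
  (PySem.List.enumerate (PySem.Chars.splitOn s.toList ['|']) 0).foldl
    (fun acc ip =>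
      if PySem.Int.mod ip.1 2 == 0 then acc + (PySem.Chars.count ip.2 ['*'] : Int) else acc)
    0

-- ===== PRECONDITION & SPEC =====
def Spec_countAsterisks (s : String) (out : Int) : Prop := out = countAsterisks_alt s
instance (s : String) (out : Int) : Decidable (Spec_countAsterisks s out) := by unfold Spec_countAsterisks; infer_instance

-- ===== CLAIM (what is proved, stated in full; the proofs are below) =====
def Claim_equal_countAsterisks : Prop := ∀ (s : String), Dom_countAsterisks s → Spec_countAsterisks s (countAsterisks s)

-- ===== LEMMAS AND PROOFS =====

-- simple recursive characterisation of split('|')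
def pvSpl : List Char → List (List Char)
  | [] => [[]]
  | c :: r => if c = '|' then [] :: pvSpl r
              else match pvSpl r with
                   | [] => [[c]]
                   | h :: t => (c :: h) :: t

def pvCat (x : List Char) : List (List Char) → List (List Char)
  | [] => [x]
  | h :: t => (x ++ h) :: t

theorem pvSpl_ne_nil (l : List Char) : pvSpl l ≠ [] := by
  cases l with
  | nil => simp [pvSpl]
  | cons c r =>
    simp only [pvSpl]
    split
    · simp
    · cases h : pvSpl r <;> simp

theorem pvSpl_go (fuel : Nat) : ∀ (l cur : List Char) (accs : List (List Char)),
    l.length ≤ fuel →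
    PySem.Chars.splitOn.go ['|'] fuel l cur accs = accs.reverse ++ pvCat cur.reverse (pvSpl l) := by
  induction fuel with
  | zero =>
    intro l cur accs h
    have : l = [] := by cases l <;> simp_all
    subst this
    simp [PySem.Chars.splitOn.go, pvSpl, pvCat]
  | succ n ih =>
    intro l cur accs h
    cases l with
    | nil => simp [PySem.Chars.splitOn.go, pvSpl, pvCat]
    | cons c rest =>
      by_cases hc : c = '|'
      · subst hc
        have hpre : List.isPrefixOf ['|'] ('|' :: rest) = true := by
          simp [List.isPrefixOf]
        rw [PySem.Chars.splitOn.go]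
        simp only [hpre, if_pos]
        rw [ih _ _ _ (by simpa using Nat.le_of_succ_le_succ h)]
        have hr := pvSpl_ne_nil rest
        cases hsp : pvSpl rest with
        | nil => exact absurd hsp hr
        | cons h' t' =>
          simp [pvSpl, pvCat, hsp]
      · have hpre : List.isPrefixOf ['|'] (c :: rest) = false := by
          simp [List.isPrefixOf, Ne.symm hc]
        rw [PySem.Chars.splitOn.go]
        simp only [hpre, Bool.false_eq_true, if_false]
        rw [ih _ _ _ (by simpa using Nat.le_of_succ_le_succ h)]
        have hr := pvSpl_ne_nil rest
        cases hsp : pvSpl rest with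
        | nil => exact absurd hsp hr
        | cons h' t' =>
          simp [pvSpl, pvCat, hc, hsp, List.append_assoc]

theorem splitOn_pipe (cs : List Char) : PySem.Chars.splitOn cs ['|'] = pvSpl cs := by
  have := pvSpl_go (cs.length + 1) cs [] [] (by omega)
  simp only [PySem.Chars.splitOn] at this ⊢
  rw [this]
  cases h : pvSpl cs with
  | nil => exact absurd h (pvSpl_ne_nil cs)
  | cons a b => simp [pvCat]

-- substring count with a one-char needle is List.count
theorem count_go_star (fuel : Nat) : ∀ (l : List Char) (acc : Nat),
    l.length ≤ fuel →
    PySem.Chars.count.go ['*'] fuel l acc = acc + l.count '*' := by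
  induction fuel with
  | zero =>
    intro l acc h
    have : l = [] := by cases l <;> simp_all
    subst this
    simp [PySem.Chars.count.go]
  | succ n ih =>
    intro l acc h
    cases l with
    | nil => simp [PySem.Chars.count.go]
    | cons c rest =>
      by_cases hc : c = '*'
      · subst hc
        have hpre : List.isPrefixOf ['*'] ('*' :: rest) = true := by simp [List.isPrefixOf]
        rw [PySem.Chars.count.go]
        simp only [hpre, if_pos]
        rw [ih _ _ (by simpa using Nat.le_of_succ_le_succ h)]
        simp
        omega
      · have hpre : List.isPrefixOf ['*'] (c :: rest) = false := by simp [List.isPrefixOf, Ne.symm hc]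
        rw [PySem.Chars.count.go]
        simp only [hpre, Bool.false_eq_true, if_false]
        rw [ih _ _ (by simpa using Nat.le_of_succ_le_succ h)]
        simp [hc]

theorem count_star (l : List Char) : PySem.Chars.count l ['*'] = l.count '*' := by
  simpa [PySem.Chars.count] using count_go_star l.length l 0 (le_refl _)

-- alternating sum of '*' counts (b = true: current segment is inside a pair, skipped)
def pvAlt : Bool → List (List Char) → Int
  | _, [] => 0
  | b, p :: ps => (if b then 0 else (p.count '*' : Int)) + pvAlt (!b) ps

theorem pvAlt_true_nil_or (ps : List (List Char)) (h : ps.length = 1) : pvAlt true ps = 0 := by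
  cases ps with
  | nil => simp at h
  | cons a t => cases t with
    | nil => simp [pvAlt]
    | cons b u => simp at h

theorem mod_two_cast (k : Nat) : PySem.Int.mod (k : Int) 2 = ((k % 2 : Nat) : Int) := by
  have h2 : (0 : Int) ≤ 2 ∨ (2 : Int) ∣ (k : Int) := Or.inl (by norm_num)
  simp only [PySem.Int.mod, Int.fmod_eq_emod, if_pos h2, add_zero]
  omega

-- B's enumerate-fold computes pvAlt
theorem alt_fold (ps : List (List Char)) : ∀ (k : Nat) (acc : Int),
    (PySem.List.enumerate ps (k : Int)).foldl
      (fun acc ip =>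
        if PySem.Int.mod ip.1 2 == 0 then acc + (PySem.Chars.count ip.2 ['*'] : Int) else acc)
      acc = acc + pvAlt (k % 2 == 1) ps := by
  induction ps with
  | nil => intro k acc; simp [PySem.List.enumerate_nil, pvAlt]
  | cons p ps ih =>
    intro k acc
    rw [PySem.List.enumerate_cons]
    have hk1 : ((k : Int) + 1) = ((k + 1 : Nat) : Int) := by push_cast; ring
    simp only [List.foldl_cons, hk1, ih (k + 1)]
    rw [mod_two_cast k, count_star]
    rcases Nat.even_or_odd k with he | ho
    · have h0 : k % 2 = 0 := Nat.even_iff.mp he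
      have h1 : (k + 1) % 2 = 1 := by omega
      simp [h0, h1, pvAlt, add_assoc]
    · have h0 : k % 2 = 1 := Nat.odd_iff.mp ho
      have h1 : (k + 1) % 2 = 0 := by omega
      simp [h0, h1, pvAlt]

-- A's machine
def pvStep (st : Int × Int × Bool) (letter : Char) : Int × Int × Bool :=
  if letter == '|' && !st.2.2 then
    (if st.2.1 ≠ 0 then (st.1 + st.2.1, 0, true) else (st.1, st.2.1, true))
  else if letter == '|' && st.2.2 then
    (st.1, st.2.1, false)
  else if !st.2.2 && letter == '*' then
    (st.1, st.2.1 + 1, st.2.2)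
  else st

def pvFin (st : Int × Int × Bool) : Int :=
  if st.2.2 = false ∧ st.2.1 ≠ 0 then st.1 + st.2.1 else st.1

theorem machine_spec (cs : List Char) : ∀ (r a : Int),
    pvFin (cs.foldl pvStep (r, a, false)) = r + a + pvAlt false (pvSpl cs)
    ∧ pvFin (cs.foldl pvStep (r, a, true)) =
        r + (if (pvSpl cs).length = 1 then 0 else a + pvAlt true (pvSpl cs)) := by
  induction cs with
  | nil =>
    intro r a
    constructor
    · by_cases ha : a = 0 <;> simp [pvFin, pvAlt, pvSpl, ha]
    · simp [pvFin, pvSpl]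
  | cons c rest ih =>
    intro r a
    have hlen : (pvSpl rest).length ≠ 0 := by
      intro h; exact pvSpl_ne_nil rest (List.length_eq_zero_iff.mp h)
    constructor
    · -- pair = false
      by_cases hc : c = '|'
      · subst hc
        have hstep : pvStep (r, a, false) '|' = (r + a, 0, true) := by
          by_cases ha : a = 0 <;> simp [pvStep, ha]
        rw [List.foldl_cons, hstep]
        rw [(ih (r + a) 0).2]
        by_cases h1 : (pvSpl rest).length = 1
        · rw [if_pos h1]
          simp [pvSpl, pvAlt, pvAlt_true_nil_or _ h1]
        · rw [if_neg h1]
          simp [pvSpl, pvAlt]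
      · have hstep : pvStep (r, a, false) c =
            (if c = '*' then (r, a + 1, false) else (r, a, false)) := by
          by_cases hs : c = '*' <;> simp [pvStep, hc, hs]
        rw [List.foldl_cons, hstep]
        cases hsp : pvSpl rest with
        | nil => exact absurd hsp (pvSpl_ne_nil rest)
        | cons h' t' =>
          by_cases hs : c = '*'
          · subst hs
            rw [if_pos rfl]
            rw [(ih r (a + 1)).1]
            simp [pvSpl, hsp, pvAlt, hc]
            ring
          · rw [if_neg hs]
            rw [(ih r a).1]
            simp [pvSpl, hsp, pvAlt, hc, hs]
    · -- pair = true
      by_cases hc : c = '|'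
      · subst hc
        have hstep : pvStep (r, a, true) '|' = (r, a, false) := by simp [pvStep]
        rw [List.foldl_cons, hstep, (ih r a).1]
        cases hsp : pvSpl rest with
        | nil => exact absurd hsp (pvSpl_ne_nil rest)
        | cons h' t' =>
          simp [pvSpl, hsp, pvAlt]
          ring
      · have hstep : pvStep (r, a, true) c = (r, a, true) := by
          simp [pvStep, hc]
        rw [List.foldl_cons, hstep, (ih r a).2]
        cases hsp : pvSpl rest with
        | nil => exact absurd hsp (pvSpl_ne_nil rest)
        | cons h' t' =>
          by_cases h1 : t' = []
          · subst h1
            simp [pvSpl, hsp, hc]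
          · have : t' ≠ [] := h1
            cases t' with
            | nil => exact absurd rfl this
            | cons u v => simp [pvSpl, hsp, hc, pvAlt]

-- ===== VERDICT (by name: the statement is the Claim_ definition above) =====
theorem countAsterisks_spec : Claim_equal_countAsterisks := by
  intro s _
  unfold Spec_countAsterisks countAsterisks countAsterisks_alt
  rw [splitOn_pipe]
  have hb := alt_fold (pvSpl s.toList) 0 0
  simp only [Nat.cast_zero] at hb
  rw [hb]
  have ha := (machine_spec s.toList 0 0).1
  show pvFin (s.toList.foldl pvStep (0, 0, false)) = _
  rw [ha]
  norm_num
  rfl
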